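-- pv_equiv track=rewrite | github.com/earthinversion/ProbeSearch-Desktop-Application | support.py | getProbePattern2
-- ===== SOURCE A (Python) =====
-- def getProbePattern2(probeName, seq_to_search):
--     # Create pattern to search
--     pattern = ""
--     if probeName == "Nucleocapsid_F":
--         for idx, charVal in enumerate(seq_to_search):
--             strAdd = "["
--             strAdd += charVal
--             # for A
--             if charVal == "A":
--                 if idx in [17, 19]:
--                     strAdd += "C"
--                     strAdd += "M"
--
--             # for T
--             elif charVal == "T":
--                 strAdd += "C"
--                 strAdd += "A"
--
--             # for G
--             elif charVal == "G":
--                 if idx in [0, 1]: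
--                     strAdd += "A"
--                     strAdd += "R"
--                 if idx in [2]:
--                     strAdd += "C"
--                 if idx in [3]:
--                     strAdd += "K"
--                 if idx in [18]:
--                     strAdd += "T"
--
--             # for C
--             elif charVal == "C":
--                 if idx in [6, 15]:
--                     strAdd += "Y"
--                 if idx in [6]:
--                     strAdd += "T"
--
--             strAdd += "]"
--             pattern += strAdd
--
--     elif probeName == "Nucleocapsid_R":
--         for idx, charVal in enumerate(seq_to_search):
--             strAdd = "["
--             strAdd += charVal
--             # for A
--             if charVal == "A":
--                 if idx in [1, ]:
--                     strAdd += "C"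
--
--             # for T
--             elif charVal == "T":
--                 if idx in [21]:
--                     strAdd += "A"
--
--             # for G
--             elif charVal == "G":
--                 if idx in [2, ]:
--                     strAdd += "A"
--                     strAdd += "T"
--                     strAdd += "K"
--                 if idx in [10, 17, 22]:
--                     strAdd += "T"
--                     strAdd += "C"
--                 if idx in [18]:
--                     strAdd += "K"
--
--             # for C
--             elif charVal == "C":
--                 if idx in [0]:
--                     strAdd += "G"
--                     strAdd += "Y"
--                 if idx in [3, ]:
--                     strAdd += "S"
--                 if idx in [11, ]:
--                     strAdd += "A"
--                     strAdd += "T"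
--                 if idx in [20, ]:
--                     strAdd += "T"
--                 if idx in [11, ]:
--                     strAdd += "Y"
--
--             strAdd += "]"
--             pattern += strAdd
--     return pattern
-- ===== SOURCE B (Python) =====
-- _RULES = {
--     "Nucleocapsid_F": {
--         ("A", 17): "CM", ("A", 19): "CM",
--         ("G", 0): "AR", ("G", 1): "AR", ("G", 2): "C", ("G", 3): "K", ("G", 18): "T",
--         ("C", 6): "YT", ("C", 15): "Y",
--     },
--     "Nucleocapsid_R": {
--         ("A", 1): "C",
--         ("T", 21): "A",
--         ("G", 2): "ATK", ("G", 10): "TC", ("G", 17): "TC", ("G", 22): "TC", ("G", 18): "K",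
--         ("C", 0): "GY", ("C", 3): "S", ("C", 11): "ATY", ("C", 20): "T",
--     },
-- }
--
--
-- def getProbePattern2(probeName, seq_to_search):
--     rules = _RULES.get(probeName)
--     if rules is None:
--         return ""
--     parts = []
--     for idx, charVal in enumerate(seq_to_search):
--         extra = "CA" if (probeName == "Nucleocapsid_F" and charVal == "T") \
--             else rules.get((charVal, idx), "")
--         parts.append("[" + charVal + extra + "]")
--     return "".join(parts)
-- ===== Notes on version B (the rewrite author's own statement) =====
-- stated objective: simpler
-- what changed: Replaces the two per-probe if/elif branch cascades with a declarative rule table (probe name -> (char, index) -> extra letters) consulted by one uniform loop that joins the bracketed groups.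
import Mathlib
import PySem

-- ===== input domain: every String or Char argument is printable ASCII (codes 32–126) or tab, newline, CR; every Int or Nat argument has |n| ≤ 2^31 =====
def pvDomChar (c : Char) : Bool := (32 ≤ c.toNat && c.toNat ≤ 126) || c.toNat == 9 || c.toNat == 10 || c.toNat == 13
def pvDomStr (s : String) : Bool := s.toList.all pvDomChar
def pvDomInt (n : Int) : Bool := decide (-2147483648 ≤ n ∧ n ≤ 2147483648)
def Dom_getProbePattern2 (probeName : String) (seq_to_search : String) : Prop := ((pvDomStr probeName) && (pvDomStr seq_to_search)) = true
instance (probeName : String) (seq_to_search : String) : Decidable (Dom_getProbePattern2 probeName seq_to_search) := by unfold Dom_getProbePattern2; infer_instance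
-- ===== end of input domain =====

-- B replaces A's two hand-written per-index branch cascades by a single rule table
-- (probe → (char, idx) → extra letters) and one uniform loop; objective: simpler.


-- ===== PORT A =====
-- one iteration of A's first loop (probeName == "Nucleocapsid_F"), building strAdd
def pvStrAddF (idx : Int) (c : Char) : List Char :=
  let s := ['['] ++ [c]
  let s :=
    if c == 'A' then
      if idx ∈ [(17:Int), 19] then s ++ ['C'] ++ ['M'] else s
    else if c == 'T' then
      s ++ ['C'] ++ ['A']
    else if c == 'G' then
      let s := if idx ∈ [(0:Int), 1] then s ++ ['A'] ++ ['R'] else s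
      let s := if idx ∈ [(2:Int)] then s ++ ['C'] else s
      let s := if idx ∈ [(3:Int)] then s ++ ['K'] else s
      if idx ∈ [(18:Int)] then s ++ ['T'] else s
    else if c == 'C' then
      let s := if idx ∈ [(6:Int), 15] then s ++ ['Y'] else s
      if idx ∈ [(6:Int)] then s ++ ['T'] else s
    else s
  s ++ [']']

-- one iteration of A's second loop (probeName == "Nucleocapsid_R")
def pvStrAddR (idx : Int) (c : Char) : List Char :=
  let s := ['['] ++ [c]
  let s :=
    if c == 'A' then
      if idx ∈ [(1:Int)] then s ++ ['C'] else s
    else if c == 'T' then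
      if idx ∈ [(21:Int)] then s ++ ['A'] else s
    else if c == 'G' then
      let s := if idx ∈ [(2:Int)] then s ++ ['A'] ++ ['T'] ++ ['K'] else s
      let s := if idx ∈ [(10:Int), 17, 22] then s ++ ['T'] ++ ['C'] else s
      if idx ∈ [(18:Int)] then s ++ ['K'] else s
    else if c == 'C' then
      let s := if idx ∈ [(0:Int)] then s ++ ['G'] ++ ['Y'] else s
      let s := if idx ∈ [(3:Int)] then s ++ ['S'] else s
      let s := if idx ∈ [(11:Int)] then s ++ ['A'] ++ ['T'] else s
      let s := if idx ∈ [(20:Int)] then s ++ ['T'] else s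
      if idx ∈ [(11:Int)] then s ++ ['Y'] else s
    else s
  s ++ [']']

def getProbePattern2 (probeName : String) (seq_to_search : String) : String :=
  if probeName == "Nucleocapsid_F" then
    String.ofList ((PySem.List.enumerate seq_to_search.toList).foldl
      (fun acc p => acc ++ pvStrAddF p.1 p.2) [])
  else if probeName == "Nucleocapsid_R" then
    String.ofList ((PySem.List.enumerate seq_to_search.toList).foldl
      (fun acc p => acc ++ pvStrAddR p.1 p.2) [])
  else
    String.ofList []

-- ===== PORT B =====
-- Source B's rule tables: probe name → ((char, idx) → extra letters)
def pvRulesF : PySem.Dict (Char × Int) (List Char) := PySem.Dict.ofList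
  [(('A', 17), ['C','M']), (('A', 19), ['C','M']),
   (('G', 0), ['A','R']), (('G', 1), ['A','R']), (('G', 2), ['C']),
   (('G', 3), ['K']), (('G', 18), ['T']),
   (('C', 6), ['Y','T']), (('C', 15), ['Y'])]

def pvRulesR : PySem.Dict (Char × Int) (List Char) := PySem.Dict.ofList
  [(('A', 1), ['C']),
   (('T', 21), ['A']),
   (('G', 2), ['A','T','K']), (('G', 10), ['T','C']), (('G', 17), ['T','C']),
   (('G', 22), ['T','C']), (('G', 18), ['K']),
   (('C', 0), ['G','Y']), (('C', 3), ['S']), (('C', 11), ['A','T','Y']),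
   (('C', 20), ['T'])]

def pvRules : PySem.Dict String (PySem.Dict (Char × Int) (List Char)) := PySem.Dict.ofList
  [("Nucleocapsid_F", pvRulesF), ("Nucleocapsid_R", pvRulesR)]

def getProbePattern2_alt (probeName : String) (seq_to_search : String) : String :=
  match PySem.Dict.get? pvRules probeName with
  | none => String.ofList []
  | some rules =>
    String.ofList (((PySem.List.enumerate seq_to_search.toList).map (fun p =>
      let extra :=
        if probeName == "Nucleocapsid_F" && p.2 == 'T' then ['C','A']
        else PySem.Dict.getD rules (p.2, p.1) []
      ['['] ++ [p.2] ++ extra ++ [']'])).flatten)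

-- ===== PRECONDITION & SPEC =====
def Spec_getProbePattern2 (probeName : String) (seq_to_search : String) (out : String) : Prop := out = getProbePattern2_alt probeName seq_to_search
instance (probeName : String) (seq_to_search : String) (out : String) : Decidable (Spec_getProbePattern2 probeName seq_to_search out) := by unfold Spec_getProbePattern2; infer_instance

-- ===== CLAIM (what is proved, stated in full; the proofs are below) =====
def Claim_equal_getProbePattern2 : Prop := ∀ (probeName : String) (seq_to_search : String), Dom_getProbePattern2 probeName seq_to_search → Spec_getProbePattern2 probeName seq_to_search (getProbePattern2 probeName seq_to_search)

-- ===== LEMMAS AND PROOFS =====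
lemma pvStrAddF_eq (idx : Int) (c : Char) :
    pvStrAddF idx c =
      ['['] ++ [c] ++ (if c == 'T' then ['C','A'] else PySem.Dict.getD pvRulesF (c, idx) []) ++ [']'] := by
  by_cases hA : c = 'A' <;> by_cases hT : c = 'T' <;> by_cases hG : c = 'G' <;>
    by_cases hC : c = 'C' <;>
  simp_all [pvStrAddF, pvRulesF, PySem.Dict.ofList, PySem.Dict.update,
    PySem.Dict.getD_insert, PySem.Dict.getD_empty, Prod.ext_iff] <;>
  split_ifs <;> simp_all

lemma pvStrAddR_eq (idx : Int) (c : Char) :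
    pvStrAddR idx c = ['['] ++ [c] ++ PySem.Dict.getD pvRulesR (c, idx) [] ++ [']'] := by
  by_cases hA : c = 'A' <;> by_cases hT : c = 'T' <;> by_cases hG : c = 'G' <;>
    by_cases hC : c = 'C' <;>
  simp_all [pvStrAddR, pvRulesR, PySem.Dict.ofList, PySem.Dict.update,
    PySem.Dict.getD_insert, PySem.Dict.getD_empty, Prod.ext_iff] <;>
  split_ifs <;> simp_all

-- ===== VERDICT (by name: the statement is the Claim_ definition above) =====
theorem getProbePattern2_spec : Claim_equal_getProbePattern2 := by
  intro probeName seq _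
  unfold Spec_getProbePattern2 getProbePattern2 getProbePattern2_alt
  by_cases hF : probeName = "Nucleocapsid_F" <;> by_cases hR : probeName = "Nucleocapsid_R"
  · simp_all
  · subst hF
    simp [pvRules, PySem.Dict.ofList, PySem.Dict.update, PySem.Dict.get?_insert,
      pvStrAddF_eq]
  · subst hR
    simp [pvRules, PySem.Dict.ofList, PySem.Dict.update, pvStrAddR_eq]
  · simp [pvRules, PySem.Dict.ofList, PySem.Dict.update, PySem.Dict.get?_insert,
      PySem.Dict.get?_empty, hF, hR]
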